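-- pv_equiv track=rewrite | github.com/hzbu820/EC521-Final-Project | slopspotter-cli/src/slopspotter/vm_sandbox.py | _summarize_file_writes
-- ===== SOURCE A (Python) =====
-- def _summarize_file_writes(paths: list[str], max_items: int = 3) -> tuple[int, int, list[str]]:
--     """Return (suspicious_write_count, total_write_count, sample_paths)."""
--     suspicious_tokens = (
--         ".bashrc",
--         ".bash_profile",
--         ".profile",
--         ".zshrc",
--         ".config/autostart",
--         "systemd",
--         "init.d",
--         "cron",
--         "crontab",
--         "/etc/rc",
--         "ld.so.preload",
--         "/etc/profile",
--         "/usr/local/bin",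
--         "/usr/bin",
--         "/bin/",
--         "/etc/ssh",
--         "service",
--         "timer",
--         "autostart",
--     )
--     benign_tokens = ("site-packages", "dist-packages", "node_modules")
--     suspicious = 0
--     total = 0
--     samples: list[str] = []
--     for path in paths:
--         if any(tok in path for tok in benign_tokens):
--             continue
--         total += 1
--         lowered = path.lower()
--         if any(tok in lowered for tok in suspicious_tokens):
--             suspicious += 1
--         if len(samples) < max_items:
--             samples.append(path)
--     return suspicious, total, samples
-- ===== SOURCE B (Python) =====
-- def _summarize_file_writes(paths: list[str], max_items: int = 3) -> tuple[int, int, list[str]]: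
--     """Return (suspicious_write_count, total_write_count, sample_paths)."""
--     suspicious_tokens = (
--         ".bashrc",
--         ".bash_profile",
--         ".profile",
--         ".zshrc",
--         ".config/autostart",
--         "systemd",
--         "init.d",
--         "cron",
--         "crontab",
--         "/etc/rc",
--         "ld.so.preload",
--         "/etc/profile",
--         "/usr/local/bin",
--         "/usr/bin",
--         "/bin/",
--         "/etc/ssh",
--         "service",
--         "timer",
--         "autostart",
--     )
--     benign_tokens = ("site-packages", "dist-packages", "node_modules")
--     n = len(paths)
--     # Token-major traversal: outer loops run over the token tables, inner over paths,
--     # accumulating boolean masks instead of per-path counters.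
--     keep = [True] * n
--     for tok in benign_tokens:
--         for i, p in enumerate(paths):
--             if tok in p:
--                 keep[i] = False
--     hit = [False] * n
--     for tok in suspicious_tokens:
--         for i, p in enumerate(paths):
--             if keep[i] and tok in p.lower():
--                 hit[i] = True
--     total = sum(keep)
--     suspicious = sum(hit)
--     samples = [p for k, p in zip(keep, paths) if k][:max(max_items, 0)]
--     return suspicious, total, samples
-- ===== Notes on version B (the rewrite author's own statement) =====
-- stated objective: alternative
-- what changed: Inverts the loop nesting: instead of A's single path-major fused loop with three mutable accumulators, B traverses token-major (each token table in the outer loop, paths inner) to build keep/hit boolean masks, then derives the counts by summing the masks and the samples by a clamped slice of the kept paths.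
import Mathlib
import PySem

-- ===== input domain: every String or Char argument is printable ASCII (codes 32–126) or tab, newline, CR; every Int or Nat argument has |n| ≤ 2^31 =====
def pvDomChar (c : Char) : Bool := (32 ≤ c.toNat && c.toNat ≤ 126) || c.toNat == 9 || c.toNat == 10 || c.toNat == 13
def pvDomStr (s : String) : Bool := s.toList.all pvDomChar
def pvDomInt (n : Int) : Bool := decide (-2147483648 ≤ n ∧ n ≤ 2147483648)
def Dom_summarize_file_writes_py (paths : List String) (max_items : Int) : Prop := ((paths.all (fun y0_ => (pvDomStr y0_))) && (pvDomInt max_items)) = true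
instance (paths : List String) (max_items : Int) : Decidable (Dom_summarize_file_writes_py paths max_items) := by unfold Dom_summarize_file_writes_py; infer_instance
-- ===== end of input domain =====

-- B inverts the loop nesting: A makes one path-major fused loop with three mutable
-- accumulators; B traverses token-major, building keep/hit boolean masks over the paths,
-- then derives counts by summing the masks and samples by a clamped slice of kept paths.


-- ===== PORT A =====
def pvSuspiciousTokens : List String :=
  [".bashrc", ".bash_profile", ".profile", ".zshrc", ".config/autostart", "systemd",
   "init.d", "cron", "crontab", "/etc/rc", "ld.so.preload", "/etc/profile",
   "/usr/local/bin", "/usr/bin", "/bin/", "/etc/ssh", "service", "timer", "autostart"]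

def pvBenignTokens : List String := ["site-packages", "dist-packages", "node_modules"]

-- A: one fold over paths carrying (suspicious, total, samples), mirroring the Python loop.
def summarize_file_writes_py (paths : List String) (max_items : Int) : Int × Int × List String :=
  paths.foldl
    (fun (st : Int × Int × List String) path =>
      if pvBenignTokens.any (fun tok => PySem.Str.isIn tok path) then st
      else
        let total := st.2.1 + 1
        let lowered := PySem.Str.lower path
        let suspicious :=
          if pvSuspiciousTokens.any (fun tok => PySem.Str.isIn tok lowered) then st.1 + 1 else st.1
        let samples :=
          if (st.2.2.length : Int) < max_items then st.2.2 ++ [path] else st.2.2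
        (suspicious, total, samples))
    (0, 0, [])

-- ===== PORT B =====
-- B: token-major passes building keep/hit masks, then counts/slice from the masks.
def summarize_file_writes_py_alt (paths : List String) (max_items : Int) : Int × Int × List String :=
  let n := paths.length
  let keep := pvBenignTokens.foldl
    (fun keep tok =>
      (keep.zip paths).map (fun kp => if PySem.Str.isIn tok kp.2 then false else kp.1))
    (List.replicate n true)
  let hit := pvSuspiciousTokens.foldl
    (fun hit tok =>
      ((hit.zip keep).zip paths).map
        (fun hkp => if hkp.1.2 && PySem.Str.isIn tok (PySem.Str.lower hkp.2) then true else hkp.1.1))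
    (List.replicate n false)
  let total : Int := keep.countP id
  let suspicious : Int := hit.countP id
  let samples :=
    ((keep.zip paths).filterMap (fun kp => if kp.1 then some kp.2 else none)).take
      (max max_items 0).toNat
  (suspicious, total, samples)

-- ===== PRECONDITION & SPEC =====
def Spec_summarize_file_writes_py (paths : List String) (max_items : Int) (out : Int × Int × List String) : Prop := out = summarize_file_writes_py_alt paths max_items
instance (paths : List String) (max_items : Int) (out : Int × Int × List String) : Decidable (Spec_summarize_file_writes_py paths max_items out) := by unfold Spec_summarize_file_writes_py; infer_instance

-- ===== CLAIM (what is proved, stated in full; the proofs are below) =====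
def Claim_equal_summarize_file_writes_py : Prop := ∀ (paths : List String) (max_items : Int), Dom_summarize_file_writes_py paths max_items → Spec_summarize_file_writes_py paths max_items (summarize_file_writes_py paths max_items)

-- ===== LEMMAS AND PROOFS =====

-- Pointwise characterisation of one zip-map step over a mask that is itself a map of paths.
lemma map_zip_map (f : String → Bool) (step : Bool → String → Bool) :
    ∀ paths : List String,
      ((paths.map f).zip paths).map (fun kp => step kp.1 kp.2)
        = paths.map (fun p => step (f p) p) := by
  intro paths
  induction paths with
  | nil => simp
  | cons p rest ih => simp [ih]

lemma map_zip_zip_map (g f : String → Bool) (step : Bool → Bool → String → Bool) :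
    ∀ paths : List String,
      (((paths.map g).zip (paths.map f)).zip paths).map (fun hkp => step hkp.1.1 hkp.1.2 hkp.2)
        = paths.map (fun p => step (g p) (f p) p) := by
  intro paths
  induction paths with
  | nil => simp
  | cons p rest ih => simp [ih]

-- The benign-token (keep) fold acts pointwise on each path.
lemma keep_fold (paths : List String) :
    ∀ (toks : List String) (f : String → Bool),
      toks.foldl
        (fun keep tok => (keep.zip paths).map (fun kp => if PySem.Str.isIn tok kp.2 then false else kp.1))
        (paths.map f)
        = paths.map (fun p => f p && !(toks.any (fun tok => PySem.Str.isIn tok p))) := by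
  intro toks
  induction toks with
  | nil => intro f; simp
  | cons t ts ih =>
    intro f
    simp only [List.foldl_cons]
    rw [map_zip_map f (fun k p => if PySem.Str.isIn t p then false else k), ih]
    apply List.map_congr_left
    intro p _
    by_cases h : PySem.Str.isIn t p = true <;>
      simp [h, Bool.and_assoc, Bool.and_left_comm]

-- The suspicious-token (hit) fold acts pointwise, with the keep mask held fixed.
lemma hit_fold (paths : List String) (kf : String → Bool) :
    ∀ (toks : List String) (g : String → Bool),
      toks.foldl
        (fun hit tok => ((hit.zip (paths.map kf)).zip paths).map
          (fun hkp => if hkp.1.2 && PySem.Str.isIn tok (PySem.Str.lower hkp.2) then true else hkp.1.1))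
        (paths.map g)
        = paths.map (fun p => g p || (kf p && toks.any (fun tok => PySem.Str.isIn tok (PySem.Str.lower p)))) := by
  intro toks
  induction toks with
  | nil => intro g; simp
  | cons t ts ih =>
    intro g
    simp only [List.foldl_cons]
    rw [map_zip_zip_map g kf
      (fun h k p => if k && PySem.Str.isIn t (PySem.Str.lower p) then true else h), ih]
    apply List.map_congr_left
    intro p _
    by_cases hk : kf p = true <;>
      by_cases hi : PySem.Str.isIn t (PySem.Str.lower p) = true <;>
        simp [hk, hi, Bool.or_assoc, Bool.or_left_comm]

lemma filterMap_zip_map (f : String → Bool) :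
    ∀ paths : List String,
      ((paths.map f).zip paths).filterMap (fun kp => if kp.1 then some kp.2 else none)
        = paths.filter f := by
  intro paths
  induction paths with
  | nil => simp
  | cons p rest ih =>
    by_cases h : f p = true <;> simp [List.filterMap_cons, h, ih, List.filter_cons]

-- Closed form of B: (count of suspicious kept paths, count of kept paths, clamped prefix).
lemma alt_closed_form (paths : List String) (max_items : Int) :
    summarize_file_writes_py_alt paths max_items
      = (let writes := paths.filter (fun p => !(pvBenignTokens.any (fun tok => PySem.Str.isIn tok p)))
         ((writes.countP (fun p => pvSuspiciousTokens.any (fun tok => PySem.Str.isIn tok (PySem.Str.lower p))) : Int),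
          (writes.length : Int),
          writes.take (max max_items 0).toNat)) := by
  unfold summarize_file_writes_py_alt
  have hrep_t : List.replicate paths.length true = paths.map (fun _ => true) := by
    simp [List.map_const']
  have hrep_f : List.replicate paths.length false = paths.map (fun _ => false) := by
    simp [List.map_const']
  simp only [hrep_t, hrep_f]
  rw [keep_fold paths pvBenignTokens (fun _ => true)]
  rw [hit_fold paths (fun p => true && !(pvBenignTokens.any (fun tok => PySem.Str.isIn tok p)))
      pvSuspiciousTokens (fun _ => false)]
  rw [filterMap_zip_map]
  simp only [Bool.true_and, Bool.false_or, List.countP_map]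
  refine Prod.ext ?_ (Prod.ext ?_ ?_)
  · simp only [List.countP_filter]
    congr 1
    apply List.countP_congr
    intro p _
    constructor <;> intro h <;> simp_all [Bool.and_comm]
  · simp [List.countP_eq_length_filter, Function.comp_def]
  · rfl

-- Invariant of A's fused loop, for an arbitrary starting state.
lemma summarize_loop_eq (max_items : Int) :
    ∀ (paths : List String) (s t : Int) (samples : List String),
      paths.foldl
        (fun (st : Int × Int × List String) path =>
          if pvBenignTokens.any (fun tok => PySem.Str.isIn tok path) then st
          else
            let total := st.2.1 + 1
            let lowered := PySem.Str.lower path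
            let suspicious :=
              if pvSuspiciousTokens.any (fun tok => PySem.Str.isIn tok lowered) then st.1 + 1 else st.1
            let samples :=
              if (st.2.2.length : Int) < max_items then st.2.2 ++ [path] else st.2.2
            (suspicious, total, samples))
        (s, t, samples)
      = (let writes := paths.filter (fun p => !(pvBenignTokens.any (fun tok => PySem.Str.isIn tok p)))
         (s + (writes.countP (fun p => pvSuspiciousTokens.any (fun tok => PySem.Str.isIn tok (PySem.Str.lower p))) : Int),
          t + (writes.length : Int),
          samples ++ writes.take (max_items - samples.length).toNat)) := by
  intro paths
  induction paths with
  | nil => intro s t samples; simp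
  | cons p rest ih =>
    intro s t samples
    simp only [List.foldl_cons, List.filter_cons]
    by_cases hb : pvBenignTokens.any (fun tok => PySem.Str.isIn tok p) = true
    · rw [if_pos hb, ih]
      simp only [hb, Bool.not_true, Bool.false_eq_true, if_false]
    · simp only [hb, Bool.not_eq_true] at *
      rw [ih]
      simp only [Bool.not_false, if_true, List.countP_cons, List.length_cons]
      by_cases hs : pvSuspiciousTokens.any (fun tok => PySem.Str.isIn tok (PySem.Str.lower p)) = true
      · simp only [hs, if_true]
        refine Prod.ext ?_ (Prod.ext ?_ ?_) <;> simp
        · ring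
        · ring
        · by_cases hlt : (samples.length : Int) < max_items
          · simp only [hlt, if_true, List.length_append, List.length_cons, List.length_nil]
            have h1 : max_items.toNat - samples.length = max_items.toNat - (samples.length + 1) + 1 := by omega
            rw [h1, List.take_succ_cons]
            simp
          · simp only [hlt, if_false]
            have h0 : max_items.toNat - samples.length = 0 := by omega
            rw [h0]
            simp
      · simp only [hs]
        refine Prod.ext ?_ (Prod.ext ?_ ?_) <;> simp
        · ring
        · by_cases hlt : (samples.length : Int) < max_items
          · simp only [hlt, if_true, List.length_append, List.length_cons, List.length_nil]
            have h1 : max_items.toNat - samples.length = max_items.toNat - (samples.length + 1) + 1 := by omega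
            rw [h1, List.take_succ_cons]
            simp
          · simp only [hlt, if_false]
            have h0 : max_items.toNat - samples.length = 0 := by omega
            rw [h0]
            simp

-- ===== VERDICT (by name: the statement is the Claim_ definition above) =====
theorem summarize_file_writes_py_spec : Claim_equal_summarize_file_writes_py := by
  intro paths max_items _
  unfold Spec_summarize_file_writes_py summarize_file_writes_py
  rw [summarize_loop_eq, alt_closed_form]
  simp only [List.length_nil, Int.natCast_zero, Int.sub_zero, List.nil_append, Int.zero_add]
  have : max_items.toNat = (max max_items 0).toNat := by omega
  rw [this]
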